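-- pv_equiv track=rewrite | github.com/Vashiel/repository.adulthideout | plugin.video.adulthideout/resources/websites/tubev.py | _looks_like_valid_page
-- ===== SOURCE A (Python) =====
-- def _looks_like_valid_page(html_content):
--     if not html_content:
--         return False
--     markers = (
--         "https://www.tubev.sex/video/",
--         "https://www.tubev.sex/video-archive/",
--         "https://www.tubev.sex/categories/",
--         'rel="next"',
--         'class="drop"',
--     )
--     return any(marker in html_content for marker in markers)
-- ===== SOURCE B (Python) =====
-- def _looks_like_valid_page(html_content):
--     if not html_content:
--         return False
--     site = "https://www.tubev.sex/"
--     markers = tuple(site + path for path in ("video/", "video-archive/", "categories/")) \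
--         + ('rel="next"', 'class="drop"')
--     # single left-to-right scan: at each position test whether any marker starts there
--     for i in range(len(html_content)):
--         for marker in markers:
--             if html_content.startswith(marker, i):
--                 return True
--     return False
-- ===== Notes on version B (the rewrite author's own statement) =====
-- stated objective: alternative
-- what changed: Replaces five independent whole-string substring-membership searches by a single left-to-right scan over positions that tests at each position whether any marker starts there, so the string is traversed once.
import Mathlib
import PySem

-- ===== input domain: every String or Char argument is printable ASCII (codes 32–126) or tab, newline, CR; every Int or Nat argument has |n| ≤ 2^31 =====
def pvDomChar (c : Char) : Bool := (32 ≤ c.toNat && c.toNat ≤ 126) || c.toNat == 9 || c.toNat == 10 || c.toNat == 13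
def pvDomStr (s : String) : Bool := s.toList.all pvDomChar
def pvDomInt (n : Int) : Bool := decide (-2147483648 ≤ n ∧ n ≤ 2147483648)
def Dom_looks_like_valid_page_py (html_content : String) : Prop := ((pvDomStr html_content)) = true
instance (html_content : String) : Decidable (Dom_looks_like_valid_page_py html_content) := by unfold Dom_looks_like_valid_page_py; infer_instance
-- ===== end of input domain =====

-- B replaces five independent whole-string substring searches by one left-to-right
-- positional scan that tests every marker at each position (objective: alternative).

-- ===== PORT A =====
def pvMarkersA : List String :=
  [ "https://www.tubev.sex/video/",
    "https://www.tubev.sex/video-archive/",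
    "https://www.tubev.sex/categories/",
    "rel=\"next\"",
    "class=\"drop\"" ]

def looks_like_valid_page_py (html_content : String) : Bool :=
  if PySem.Str.len html_content == 0 then false
  else pvMarkersA.any (fun marker => PySem.Str.isIn marker html_content)

-- ===== PORT B =====
-- site + path concatenation from Source B, done on the char-list level (String.append is kernel-opaque)
def pvMarkersB : List (List Char) :=
  (["video/".toList, "video-archive/".toList, "categories/".toList].map
      (fun path => "https://www.tubev.sex/".toList ++ path))
    ++ ["rel=\"next\"".toList, "class=\"drop\"".toList]

-- 'html_content.startswith(marker, i)' at position i = startswith on the i-th suffix;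
-- the scan over i ∈ range(len) is the recursion over successive suffixes.
def pvScanB (ms : List (List Char)) : List Char → Bool
  | [] => false
  | c :: rest =>
      if ms.any (fun m => PySem.Chars.startswith (c :: rest) m) then true
      else pvScanB ms rest

def looks_like_valid_page_py_alt (html_content : String) : Bool :=
  if PySem.Str.len html_content == 0 then false
  else pvScanB pvMarkersB html_content.toList

-- ===== PRECONDITION & SPEC =====
def Spec_looks_like_valid_page_py (html_content : String) (out : Bool) : Prop := out = looks_like_valid_page_py_alt html_content
instance (html_content : String) (out : Bool) : Decidable (Spec_looks_like_valid_page_py html_content out) := by unfold Spec_looks_like_valid_page_py; infer_instance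

-- ===== CLAIM (what is proved, stated in full; the proofs are below) =====
def Claim_equal_looks_like_valid_page_py : Prop := ∀ (html_content : String), Dom_looks_like_valid_page_py html_content → Spec_looks_like_valid_page_py html_content (looks_like_valid_page_py html_content)

-- ===== LEMMAS AND PROOFS =====

-- the positional scan finds exactly the infix occurrences (markers are nonempty)
lemma pvScanB_iff (ms : List (List Char)) (hne : ∀ m ∈ ms, m ≠ []) (l : List Char) :
    pvScanB ms l = true ↔ ∃ m ∈ ms, m <:+: l := by
  induction l with
  | nil =>
      simp only [pvScanB, Bool.false_eq_true, false_iff]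
      rintro ⟨m, hm, hinf⟩
      exact hne m hm (List.eq_nil_of_infix_nil hinf)
  | cons c rest ih =>
      simp only [pvScanB]
      split_ifs with h
      · simp only [true_iff]
        rw [List.any_eq_true] at h
        obtain ⟨m, hm, hsw⟩ := h
        exact ⟨m, hm, ((PySem.Chars.startswith_iff _ _).mp hsw).isInfix⟩
      · rw [ih]
        constructor
        · rintro ⟨m, hm, hinf⟩; exact ⟨m, hm, hinf.trans (List.suffix_cons c rest).isInfix⟩
        · rintro ⟨m, hm, hinf⟩
          rcases List.infix_cons_iff.mp hinf with hpre | hinf'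
          · exfalso
            apply h
            rw [List.any_eq_true]
            exact ⟨m, hm, (PySem.Chars.startswith_iff _ _).mpr hpre⟩
          · exact ⟨m, hm, hinf'⟩

-- ===== VERDICT (by name: the statement is the Claim_ definition above) =====
theorem looks_like_valid_page_py_spec : Claim_equal_looks_like_valid_page_py := by
  intro html_content _
  unfold Spec_looks_like_valid_page_py looks_like_valid_page_py looks_like_valid_page_py_alt
  split_ifs with h
  · rfl
  · have hA : pvMarkersA.any (fun marker => PySem.Str.isIn marker html_content) = true ↔
        ∃ m ∈ pvMarkersA, m.toList <:+: html_content.toList := by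
      rw [List.any_eq_true]
      constructor
      · rintro ⟨m, hm, hin⟩; exact ⟨m, hm, (PySem.Str.isIn_iff_infix _ _).mp hin⟩
      · rintro ⟨m, hm, hin⟩; exact ⟨m, hm, (PySem.Str.isIn_iff_infix _ _).mpr hin⟩
    have hB := pvScanB_iff pvMarkersB (by decide) html_content.toList
    have hM : pvMarkersA.map String.toList = pvMarkersB := by decide
    rw [Bool.eq_iff_iff, hA, hB]
    constructor
    · rintro ⟨m, hm, hinf⟩
      exact ⟨m.toList, hM ▸ List.mem_map_of_mem hm, hinf⟩
    · rintro ⟨m, hm, hinf⟩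
      obtain ⟨s, hs, rfl⟩ := List.mem_map.mp (hM ▸ hm)
      exact ⟨s, hs, hinf⟩
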